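-- pv_equiv track=rewrite | github.com/alexisraelmtz/master-python101 | challengues/groupDict.py | groupingDishesOld
-- ===== SOURCE A (Python) =====
-- def groupingDishesOld(dishes):
--     if dishes:
--         uniqueIngredients = set(
--             [ingredient for foodList in dishes for ingredient in foodList[1::]])
--         mother = list()
--         for item in uniqueIngredients:
--             temp = list()
--             for n in range(len(dishes)):
--                 if item in dishes[n]:
--                     temp.append(dishes[n][0])
--             if len(temp) >= 2:
--                 temp.sort()
--                 temp.insert(0, item)
--                 mother.append(temp)
--         mother.sort()
--     return mother
-- ===== SOURCE B (Python) =====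
-- def groupingDishesOld(dishes):
--     # Inverted index: token -> names of the dishes whose row contains it.
--     # A row matches a token wherever it appears in the row, so the whole
--     # row is indexed; each row contributes each of its tokens once.
--     index = {}
--     for dish in dishes:
--         for token in set(dish):
--             index.setdefault(token, []).append(dish[0])
--     ingredients = {t for dish in dishes for t in dish[1:]}
--     return sorted([ing] + sorted(index[ing])
--                   for ing in ingredients if len(index[ing]) >= 2)
-- ===== Notes on version B (the rewrite author's own statement) =====
-- stated objective: faster
-- what changed: Replaces the nested scan (for every distinct ingredient, re-scan all dishes) by a single pass over the dishes that builds a token->dish-names inverted index, then one filter over the ingredient set and one sort.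
-- crash fix: On the empty dish list A raises UnboundLocalError (mother is never assigned); B returns []. — e.g. on groupingDishesOld([]): A raises UnboundLocalError, B returns []
import Mathlib
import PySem

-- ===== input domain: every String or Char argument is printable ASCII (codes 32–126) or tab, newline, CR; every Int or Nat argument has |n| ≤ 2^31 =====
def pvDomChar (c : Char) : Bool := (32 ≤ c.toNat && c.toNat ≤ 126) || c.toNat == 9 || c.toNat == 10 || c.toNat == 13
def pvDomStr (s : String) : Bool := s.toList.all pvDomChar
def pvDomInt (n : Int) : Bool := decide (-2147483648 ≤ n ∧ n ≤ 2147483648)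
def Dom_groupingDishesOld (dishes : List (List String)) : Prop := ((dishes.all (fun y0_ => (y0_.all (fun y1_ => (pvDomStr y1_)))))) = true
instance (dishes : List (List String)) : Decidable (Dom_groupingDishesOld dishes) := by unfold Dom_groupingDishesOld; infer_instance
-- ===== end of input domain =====

-- B replaces A's nested rescan of all dishes per ingredient by one pass building a
-- token → dish-names inverted index, then one filter and sort (objective: faster).

-- ===== PORT A =====
-- A iterates over the Python set of ingredients; the final `mother.sort()` makes the
-- result independent of the set's iteration order (entries have pairwise distinct heads),
-- so the insertion-order PySem.Set is exact here.
def groupingDishesOld (dishes : List (List String)) : List (List String) :=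
  let uniqueIngredients : PySem.Set String :=
    PySem.Set.ofList (dishes.flatMap (fun foodList => PySem.List.slice foodList (some 1) none))
  let mother : List (List String) :=
    uniqueIngredients.foldl (fun mother item =>
      let temp : List String :=
        (PySem.List.pyRange 0 (PySem.List.len dishes)).foldl (fun temp n =>
          if (PySem.List.pyGetD dishes n []).contains item
          then temp ++ [PySem.List.pyGetD (PySem.List.pyGetD dishes n []) 0 ""]
          else temp) []
      if 2 ≤ temp.length
      then mother ++ [PySem.List.insert (PySem.List.sorted temp (fun x => x)) 0 item]
      else mother) []
  PySem.List.sorted mother (fun x => x)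

-- ===== PORT B =====
-- B iterates each dish's token set; per token the appended names are in dish order,
-- and the final sort makes the result independent of set/dict iteration order.
def groupingDishesOld_alt (dishes : List (List String)) : List (List String) :=
  let index : PySem.Dict String (List String) :=
    dishes.foldl (fun index dish =>
      (PySem.Set.ofList dish).foldl
        (fun index token =>
          index.modify token [] (fun l => l ++ [PySem.List.pyGetD dish 0 ""])) index)
      PySem.Dict.empty
  let ingredients : PySem.Set String :=
    PySem.Set.ofList (dishes.flatMap (fun dish => PySem.List.slice dish (some 1) none))
  PySem.List.sorted
    ((ingredients.filter (fun ing => decide (2 ≤ (index.getD ing []).length))).map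
      (fun ing => ing :: PySem.List.sorted (index.getD ing []) (fun x => x)))
    (fun x => x)

-- ===== PRECONDITION & SPEC =====
-- Pre_ excludes only the empty list, on which A raises UnboundLocalError (mother unassigned).
def Pre_groupingDishesOld (dishes : List (List String)) : Prop := dishes ≠ []
instance (dishes : List (List String)) : Decidable (Pre_groupingDishesOld dishes) := by unfold Pre_groupingDishesOld; infer_instance
def pvWitness_groupingDishesOld : List (List String) := [["soup", "salt"], ["stew", "salt"]]

-- On the empty dish list A raises UnboundLocalError (mother is never assigned); B returns [].
def Raises_groupingDishesOld (dishes : List (List String)) : Prop := dishes = []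
instance (dishes : List (List String)) : Decidable (Raises_groupingDishesOld dishes) := by unfold Raises_groupingDishesOld; infer_instance
def pvRaiseWitness_groupingDishesOld : List (List String) := []
def pvRaiseWitnessOut_groupingDishesOld : List (List String) := []

def Spec_groupingDishesOld (dishes : List (List String)) (out : List (List String)) : Prop := out = groupingDishesOld_alt dishes
instance (dishes : List (List String)) (out : List (List String)) : Decidable (Spec_groupingDishesOld dishes out) := by unfold Spec_groupingDishesOld; infer_instance

-- ===== CLAIM (what is proved, stated in full; the proofs are below) =====
def Claim_equal_groupingDishesOld : Prop := ∀ (dishes : List (List String)), Dom_groupingDishesOld dishes → Pre_groupingDishesOld dishes → Spec_groupingDishesOld dishes (groupingDishesOld dishes)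
def Claim_raises_groupingDishesOld : Prop := (∀ (dishes : List (List String)), Dom_groupingDishesOld dishes → Raises_groupingDishesOld dishes → ¬ Pre_groupingDishesOld dishes) ∧ (Dom_groupingDishesOld (pvRaiseWitness_groupingDishesOld) ∧ Raises_groupingDishesOld (pvRaiseWitness_groupingDishesOld) ∧ groupingDishesOld_alt (pvRaiseWitness_groupingDishesOld) = pvRaiseWitnessOut_groupingDishesOld)

-- ===== LEMMAS AND PROOFS =====

-- the list of dish names whose row contains `item`, in dish order (A's `temp` before
-- sorting, B's `index[item]`)
def pvNames (dishes : List (List String)) (item : String) : List String :=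
  (dishes.filter (fun d => d.contains item)).map (fun d => PySem.List.pyGetD d 0 "")

def pvEntry (dishes : List (List String)) (item : String) : List String :=
  item :: PySem.List.sorted (pvNames dishes item) (fun x => x)

theorem pv_filter_eq_of_nodup {α : Type} [BEq α] [LawfulBEq α] (l : List α) (k : α)
    (h : l.Nodup) : l.filter (· == k) = if k ∈ l then [k] else [] := by
  induction l with
  | nil => simp
  | cons a t ih =>
    simp only [List.nodup_cons] at h
    by_cases hk : a = k
    · subst hk
      have h2 : t.filter (· == a) = [] :=
        List.filter_eq_nil_iff.mpr (fun b hb => by simp; rintro rfl; exact h.1 hb)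
      simp [h2, h.1]
    · simp [hk, Ne.symm hk, ih h.2]

theorem pv_flatMap_if {α β : Type} (l : List α) (p : α → Bool) (f : α → β) :
    (l.flatMap fun x => if p x then [f x] else []) = (l.filter p).map f := by
  induction l with
  | nil => rfl
  | cons a t ih => by_cases h : p a <;> simp [h, ih]

-- A computes: filter the distinct ingredients by multiplicity ≥ 2, map to entries, sort.
theorem pv_A_eq (dishes : List (List String)) :
    groupingDishesOld dishes =
      PySem.List.sorted
        (((PySem.Set.ofList (dishes.flatMap (fun d => PySem.List.slice d (some 1) none))).filter
            (fun item => decide (2 ≤ (pvNames dishes item).length))).map (pvEntry dishes))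
        (fun x => x) := by
  unfold groupingDishesOld
  dsimp only
  have htemp : ∀ item : String,
      ((PySem.List.pyRange 0 (PySem.List.len dishes)).foldl (fun temp n =>
          if (PySem.List.pyGetD dishes n []).contains item
          then temp ++ [PySem.List.pyGetD (PySem.List.pyGetD dishes n []) 0 ""]
          else temp) []) = pvNames dishes item := by
    intro item
    have := PySem.List.foldl_pyRange_pyGetD dishes ([] : List String)
      (fun temp d => if d.contains item then temp ++ [PySem.List.pyGetD d 0 ""] else temp)
      ([] : List String) (a := 0) le_rfl
    simp only [Int.toNat_zero, List.drop_zero] at this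
    rw [this, PySem.List.foldl_append_if (fun d => d.contains item)
      (fun d => PySem.List.pyGetD d 0 "") dishes []]
    simp [pvNames]
  have hfun : (fun (mother : List (List String)) (item : String) =>
      let temp : List String :=
        (PySem.List.pyRange 0 (PySem.List.len dishes)).foldl (fun temp n =>
          if (PySem.List.pyGetD dishes n []).contains item
          then temp ++ [PySem.List.pyGetD (PySem.List.pyGetD dishes n []) 0 ""]
          else temp) []
      if 2 ≤ temp.length
      then mother ++ [PySem.List.insert (PySem.List.sorted temp (fun x => x)) 0 item]
      else mother)
      = (fun mother item =>
          if decide (2 ≤ (pvNames dishes item).length)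
          then mother ++ [pvEntry dishes item] else mother) := by
    funext mother item
    simp only [htemp item, pvEntry, PySem.List.insert_zero, decide_eq_true_eq]
  rw [hfun, PySem.List.foldl_append_if
    (fun item => decide (2 ≤ (pvNames dishes item).length)) (pvEntry dishes) _ []]
  simp

-- the (token, dish-name) pairs B's single pass feeds to the index, in order
def pvPairs (dishes : List (List String)) : List (String × String) :=
  dishes.flatMap (fun dish =>
    (PySem.Set.ofList dish).map (fun tok => (tok, PySem.List.pyGetD dish 0 "")))

theorem pv_pairs_filter (dishes : List (List String)) (c : String) :
    ((pvPairs dishes).filter (fun p => p.1 == c)).map (fun p => p.2) = pvNames dishes c := by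
  unfold pvPairs pvNames
  rw [List.filter_flatMap]
  have hinner : ∀ dish : List String,
      (((PySem.Set.ofList dish).map (fun tok => (tok, PySem.List.pyGetD dish 0 ""))).filter
        (fun p => p.1 == c))
      = if dish.contains c then [(c, PySem.List.pyGetD dish 0 "")] else [] := by
    intro dish
    rw [List.filter_map]
    have : ((fun p : String × String => p.1 == c) ∘ (fun tok => (tok, PySem.List.pyGetD dish 0 "")))
        = (fun tok => tok == c) := rfl
    rw [this, pv_filter_eq_of_nodup _ c (PySem.Set.nodup_ofList _)]
    by_cases h : c ∈ dish
    · simp [h, PySem.Set.mem_ofList]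
    · simp [h, PySem.Set.mem_ofList]
  simp only [hinner]
  rw [pv_flatMap_if dishes (fun d => d.contains c) (fun d => (c, PySem.List.pyGetD d 0 ""))]
  simp [List.map_map, Function.comp_def]

-- B's index looks up exactly pvNames, so B computes A's filtered, mapped, sorted list.
theorem pv_B_eq (dishes : List (List String)) :
    groupingDishesOld_alt dishes =
      PySem.List.sorted
        (((PySem.Set.ofList (dishes.flatMap (fun d => PySem.List.slice d (some 1) none))).filter
            (fun item => decide (2 ≤ (pvNames dishes item).length))).map (pvEntry dishes))
        (fun x => x) := by
  unfold groupingDishesOld_alt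
  dsimp only
  have hidx : dishes.foldl (fun index dish =>
        (PySem.Set.ofList dish).foldl
          (fun index token =>
            index.modify token [] (fun l => l ++ [PySem.List.pyGetD dish 0 ""])) index)
        PySem.Dict.empty
      = (pvPairs dishes).foldl (fun d p => d.modify p.1 [] (fun l => l ++ [p.2]))
          PySem.Dict.empty := by
    rw [pvPairs, List.foldl_flatMap]
    simp only [List.foldl_map]
  rw [hidx]
  have hgetD : ∀ k : String, ((pvPairs dishes).foldl
      (fun d p => d.modify p.1 [] (fun l => l ++ [p.2])) PySem.Dict.empty).getD k []
      = pvNames dishes k := by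
    intro k
    rw [PySem.Dict.getD_foldl_modify_append (pvPairs dishes) PySem.Dict.empty k]
    simp [pv_pairs_filter dishes k]
  simp only [hgetD]
  rfl

-- ===== VERDICT (by name: the statement is the Claim_ definition above) =====
theorem groupingDishesOld_spec : Claim_equal_groupingDishesOld := by
  intro dishes _ _
  unfold Spec_groupingDishesOld
  rw [pv_A_eq, pv_B_eq]

theorem groupingDishesOld_raises : Claim_raises_groupingDishesOld := by
  unfold Claim_raises_groupingDishesOld
  exact ⟨fun dishes _ h => by simp [Raises_groupingDishesOld] at h; simp [Pre_groupingDishesOld, h],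
    by decide⟩

-- self-check: the raise witness lies in Raises_ and B's port returns the stated value there
theorem groupingDishesOld_raises_witness_ok :
    Raises_groupingDishesOld pvRaiseWitness_groupingDishesOld ∧
      groupingDishesOld_alt pvRaiseWitness_groupingDishesOld = pvRaiseWitnessOut_groupingDishesOld :=
  groupingDishesOld_raises.2.2
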